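-- pv_equiv track=rewrite | github.com/schuppnura/python-anonymization | anonymiser.py | generate_variants_for_person
-- ===== SOURCE A (Python) =====
-- from typing import Any, Dict, Iterable, List, Tuple, Optional
--
-- def generate_variants_for_person(person: Dict[str, List[str]]) -> List[str]:
--     """
--     Generate simple surface-form variants for matching.
--     Why: cover 'Given Family' and 'Family Given' orders without overfitting.
--     How: join tokens in two orders; deduplicate.
--     """
--     given = " ".join(person.get("given", []))
--     family = " ".join(person.get("family", []))
--     variants: List[str] = []
--     if given and family:
--         variants.extend([f"{given} {family}", f"{family} {given}"])
--     elif family: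
--         variants.append(family)
--     elif given:
--         variants.append(given)
--     dedup: List[str] = []
--     seen = set()
--     for v in variants:
--         if v not in seen:
--             dedup.append(v)
--             seen.add(v)
--     return dedup
-- ===== SOURCE B (Python) =====
-- def generate_variants_for_person(person):
--     given = " ".join(person.get("given", []))
--     family = " ".join(person.get("family", []))
--     orders = [(given, family), (family, given)]
--     results = [s for s in (" ".join(p for p in pair if p) for pair in orders) if s]
--     return list(dict.fromkeys(results))
-- ===== Notes on version B (the rewrite author's own statement) =====
-- stated objective: alternative
-- what changed: Replaces the three-way if/elif cascade and the manual seen-set dedup loop with a uniform generate-filter-dedup pass: build both orderings, join the non-empty parts of each, drop empty results, and dedup via dict.fromkeys.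
import Mathlib
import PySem

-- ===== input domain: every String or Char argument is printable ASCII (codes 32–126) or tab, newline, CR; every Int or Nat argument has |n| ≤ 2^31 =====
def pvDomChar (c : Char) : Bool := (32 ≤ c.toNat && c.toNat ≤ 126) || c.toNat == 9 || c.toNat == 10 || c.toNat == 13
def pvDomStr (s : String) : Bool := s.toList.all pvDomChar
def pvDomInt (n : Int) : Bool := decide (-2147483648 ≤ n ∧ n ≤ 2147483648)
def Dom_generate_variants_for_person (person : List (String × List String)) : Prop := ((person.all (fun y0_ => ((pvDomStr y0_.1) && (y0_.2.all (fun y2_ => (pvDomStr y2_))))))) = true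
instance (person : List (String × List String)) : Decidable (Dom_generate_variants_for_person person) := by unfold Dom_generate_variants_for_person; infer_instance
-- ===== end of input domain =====

-- B replaces A's three-way if/elif cascade and manual seen-set dedup loop by a uniform
-- generate-filter-dedup pass over the two orderings (objective: alternative decomposition).

-- ===== PORT A =====
def generate_variants_for_person (person : List (String × List String)) : List String :=
  let given := PySem.Str.join " " (PySem.Dict.getD (PySem.Dict.mk person) "given" [])
  let family := PySem.Str.join " " (PySem.Dict.getD (PySem.Dict.mk person) "family" [])
  let variants : List String :=
    if given ≠ "" ∧ family ≠ "" then
      -- f"{given} {family}" / f"{family} {given}" ported exactly as " ".join of the two parts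
      [PySem.Str.join " " [given, family], PySem.Str.join " " [family, given]]
    else if family ≠ "" then [family]
    else if given ≠ "" then [given]
    else []
  -- for v in variants: if v not in seen: dedup.append(v); seen.add(v)
  (variants.foldl
    (fun (acc : List String × PySem.Set String) v =>
      if PySem.Set.contains acc.2 v then acc
      else (acc.1 ++ [v], PySem.Set.add acc.2 v))
    ([], PySem.Set.empty)).1

-- ===== PORT B =====
def generate_variants_for_person_alt (person : List (String × List String)) : List String :=
  let given := PySem.Str.join " " (PySem.Dict.getD (PySem.Dict.mk person) "given" [])
  let family := PySem.Str.join " " (PySem.Dict.getD (PySem.Dict.mk person) "family" [])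
  let orders : List (String × String) := [(given, family), (family, given)]
  let results :=
    (orders.map (fun pair =>
      PySem.Str.join " " (([pair.1, pair.2]).filter (fun p => decide (p ≠ ""))))).filter
      (fun s => decide (s ≠ ""))
  PySem.List.dedup results

-- ===== PRECONDITION & SPEC =====
def Spec_generate_variants_for_person (person : List (String × List String)) (out : List String) : Prop := out = generate_variants_for_person_alt person
instance (person : List (String × List String)) (out : List String) : Decidable (Spec_generate_variants_for_person person out) := by unfold Spec_generate_variants_for_person; infer_instance

-- ===== CLAIM (what is proved, stated in full; the proofs are below) =====
def Claim_equal_generate_variants_for_person : Prop := ∀ (person : List (String × List String)), Dom_generate_variants_for_person person → Spec_generate_variants_for_person person (generate_variants_for_person person)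

-- ===== LEMMAS AND PROOFS =====

-- " ".join of two strings is non-empty as soon as the first is
lemma pv_join2_ne (g f : String) : PySem.Str.join " " [g, f] ≠ "" := by
  have : [' '].intercalate [g.toList, f.toList] = g.toList ++ ' ' :: f.toList := by
    simp [List.intercalate]
  simp [PySem.Str.join, PySem.Chars.join, this]

-- A's seen-set loop on a two-element list
lemma pv_foldl_pair (x y : String) :
    (([x, y] : List String).foldl
      (fun (acc : List String × PySem.Set String) v =>
        if PySem.Set.contains acc.2 v then acc
        else (acc.1 ++ [v], PySem.Set.add acc.2 v))
      ([], PySem.Set.empty)).1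
    = if x = y then [x] else [x, y] := by
  simp [List.foldl, PySem.Set.contains, PySem.Set.add, PySem.Set.empty]
  split_ifs <;> simp_all

-- dict.fromkeys on a two-element list
lemma pv_dedup_pair (x y : String) :
    PySem.List.dedup [x, y] = if x = y then [x] else [x, y] := by
  simp [PySem.List.dedup, PySem.Set.ofList, PySem.Set.add, PySem.Set.contains, List.foldl]
  split_ifs with h1 <;> simp_all

-- both bodies agree for arbitrary joined given/family strings
lemma pv_core (g f : String) :
    ((if g ≠ "" ∧ f ≠ "" then
        [PySem.Str.join " " [g, f], PySem.Str.join " " [f, g]]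
      else if f ≠ "" then [f]
      else if g ≠ "" then [g]
      else ([] : List String)).foldl
      (fun (acc : List String × PySem.Set String) v =>
        if PySem.Set.contains acc.2 v then acc
        else (acc.1 ++ [v], PySem.Set.add acc.2 v))
      ([], PySem.Set.empty)).1
    = PySem.List.dedup
        ((([(g, f), (f, g)] : List (String × String)).map
          (fun pair => PySem.Str.join " " (([pair.1, pair.2]).filter (fun p => decide (p ≠ ""))))).filter
          (fun s => decide (s ≠ ""))) := by
  by_cases hg : g = "" <;> by_cases hf : f = ""
  · subst hg; subst hf; decide
  · subst hg
    simp [hf, List.foldl, PySem.Set.contains, PySem.Set.add, PySem.Set.empty,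
      PySem.List.dedup, PySem.Set.ofList, PySem.Str.join, PySem.Chars.join, List.intercalate]
  · subst hf
    simp [hg, List.foldl, PySem.Set.contains, PySem.Set.add, PySem.Set.empty,
      PySem.List.dedup, PySem.Set.ofList, PySem.Str.join, PySem.Chars.join, List.intercalate]
  · have h1 := pv_join2_ne g f
    have h2 := pv_join2_ne f g
    rw [if_pos ⟨hg, hf⟩, pv_foldl_pair]
    have hB : (([(g, f), (f, g)] : List (String × String)).map
          (fun pair => PySem.Str.join " " (([pair.1, pair.2]).filter (fun p => decide (p ≠ ""))))).filter
          (fun s => decide (s ≠ "")) = [PySem.Str.join " " [g, f], PySem.Str.join " " [f, g]] := by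
      simp [hg, hf, h1, h2]
    rw [hB, pv_dedup_pair]

-- ===== VERDICT (by name: the statement is the Claim_ definition above) =====
theorem generate_variants_for_person_spec : Claim_equal_generate_variants_for_person := by
  intro person _
  unfold Spec_generate_variants_for_person generate_variants_for_person generate_variants_for_person_alt
  exact pv_core _ _
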